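-- pv_equiv track=rewrite | github.com/simonsysun/talktype | core/post_processor.py | is_safe_for_auto_replace
-- ===== SOURCE A (Python) =====
-- def is_safe_for_auto_replace(canonical: str) -> bool:
--     canonical = (canonical or "").strip()
--     if not canonical:
--         return False
--
--     alpha_chars = [c for c in canonical if c.isalpha()]
--     if len(alpha_chars) >= 2 and all(c.isupper() for c in alpha_chars):
--         return True
--     if any(c.isdigit() for c in canonical):
--         return True
--     if len(canonical) > 1 and any(c.isupper() for c in canonical[1:]):
--         return True
--     if " " in canonical:
--         return True
--     if any(ord(c) > 127 for c in canonical):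
--         return True
--     return False
-- ===== SOURCE B (Python) =====
-- def is_safe_for_auto_replace(canonical: str) -> bool:
--     s = (canonical or "").strip()
--     if not s:
--         return False
--     alpha = 0
--     non_upper_alpha = False
--     digit = False
--     upper_tail = False
--     space = False
--     nonascii = False
--     for i, c in enumerate(s):
--         if c.isalpha():
--             alpha += 1
--             if not c.isupper():
--                 non_upper_alpha = True
--         if c.isdigit():
--             digit = True
--         if i >= 1 and c.isupper():
--             upper_tail = True
--         if c == " ":
--             space = True
--         if ord(c) > 127:
--             nonascii = True
--     return (alpha >= 2 and not non_upper_alpha) or digit or upper_tail or space or nonascii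
-- ===== Notes on version B (the rewrite author's own statement) =====
-- stated objective: alternative
-- what changed: Replaced A's five separate scans (a filter plus four any/all passes over the string) by one single pass that accumulates flags/counters and combines them at the end.
import Mathlib
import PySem

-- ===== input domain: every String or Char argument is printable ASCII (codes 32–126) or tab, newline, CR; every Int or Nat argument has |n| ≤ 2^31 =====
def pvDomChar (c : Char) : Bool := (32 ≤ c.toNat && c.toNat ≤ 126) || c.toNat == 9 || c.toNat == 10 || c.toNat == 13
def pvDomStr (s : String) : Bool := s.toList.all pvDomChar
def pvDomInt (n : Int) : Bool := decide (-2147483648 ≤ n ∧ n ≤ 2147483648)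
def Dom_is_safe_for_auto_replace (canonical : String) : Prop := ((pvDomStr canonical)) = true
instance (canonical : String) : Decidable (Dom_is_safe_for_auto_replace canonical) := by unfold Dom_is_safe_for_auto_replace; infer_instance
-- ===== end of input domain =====

-- B makes one single pass accumulating flags instead of A's five separate scans (alternative decomposition, same cost).

-- ===== PORT A =====
def is_safe_for_auto_replace (canonical : String) : Bool :=
  let c := PySem.Str.strip canonical
  if c = "" then false
  else
    let cs := c.toList
    let alpha_chars := cs.filter PySem.Chars.isalpha
    if decide (alpha_chars.length ≥ 2) && alpha_chars.all PySem.Chars.isupper then true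
    else if cs.any PySem.Chars.isdigit then true
    else if decide (cs.length > 1) && (PySem.List.slice cs (some 1) none).any PySem.Chars.isupper then true
    else if PySem.Str.isIn " " c then true
    else if cs.any (fun ch => decide (ch.toNat > 127)) then true
    else false

-- ===== PORT B =====
-- B's single loop over the characters with an index, carrying the six accumulators.
def pvLoopB : List Char → Nat → Nat → Bool → Bool → Bool → Bool → Bool →
    Nat × Bool × Bool × Bool × Bool × Bool
  | [], _, a, nu, d, u, sp, na => (a, nu, d, u, sp, na)
  | c :: cs, i, a, nu, d, u, sp, na =>
    let a' := if PySem.Chars.isalpha c then a + 1 else a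
    let nu' := if PySem.Chars.isalpha c && !PySem.Chars.isupper c then true else nu
    let d' := if PySem.Chars.isdigit c then true else d
    let u' := if decide (1 ≤ i) && PySem.Chars.isupper c then true else u
    let sp' := if c == ' ' then true else sp
    let na' := if decide (c.toNat > 127) then true else na
    pvLoopB cs (i + 1) a' nu' d' u' sp' na'

def is_safe_for_auto_replace_alt (canonical : String) : Bool :=
  let s := PySem.Str.strip canonical
  if s = "" then false
  else
    let r := pvLoopB s.toList 0 0 false false false false false
    (decide (r.1 ≥ 2) && !r.2.1) || r.2.2.1 || r.2.2.2.1 || r.2.2.2.2.1 || r.2.2.2.2.2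

-- ===== PRECONDITION & SPEC =====
def Spec_is_safe_for_auto_replace (canonical : String) (out : Bool) : Prop := out = is_safe_for_auto_replace_alt canonical
instance (canonical : String) (out : Bool) : Decidable (Spec_is_safe_for_auto_replace canonical out) := by unfold Spec_is_safe_for_auto_replace; infer_instance

-- ===== CLAIM (what is proved, stated in full; the proofs are below) =====
def Claim_equal_is_safe_for_auto_replace : Prop := ∀ (canonical : String), Dom_is_safe_for_auto_replace canonical → Spec_is_safe_for_auto_replace canonical (is_safe_for_auto_replace canonical)

-- ===== LEMMAS AND PROOFS =====

theorem pv_orAcc (x acc r : Bool) : ((if x then true else acc) || r) = (acc || (x || r)) := by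
  cases x <;> cases acc <;> cases r <;> rfl

-- the loop computes the five facts A reads off with separate scans
theorem pvLoopB_spec (cs : List Char) (i a : Nat) (nu d u sp na : Bool) :
    pvLoopB cs i a nu d u sp na =
      (a + (cs.filter PySem.Chars.isalpha).length,
       nu || cs.any (fun c => PySem.Chars.isalpha c && !PySem.Chars.isupper c),
       d || cs.any PySem.Chars.isdigit,
       u || (if i = 0 then cs.drop 1 else cs).any PySem.Chars.isupper,
       sp || cs.any (· == ' '),
       na || cs.any (fun c => decide (c.toNat > 127))) := by
  induction cs generalizing i a nu d u sp na with
  | nil => simp [pvLoopB]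
  | cons c cs ih =>
    cases i with
    | zero =>
      simp only [pvLoopB, ih, Prod.mk.injEq]
      refine ⟨?_, ?_, ?_, ?_, ?_, ?_⟩
      · by_cases h : PySem.Chars.isalpha c = true <;> simp [h] <;> omega
      · simp only [List.any_cons]; exact pv_orAcc _ _ _
      · simp only [List.any_cons]; exact pv_orAcc _ _ _
      · simp
      · simp only [List.any_cons]; exact pv_orAcc _ _ _
      · simp only [List.any_cons]; exact pv_orAcc _ _ _
    | succ n =>
      simp only [pvLoopB, ih, Prod.mk.injEq]
      refine ⟨?_, ?_, ?_, ?_, ?_, ?_⟩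
      · by_cases h : PySem.Chars.isalpha c = true <;> simp [h] <;> omega
      · simp only [List.any_cons]; exact pv_orAcc _ _ _
      · simp only [List.any_cons]; exact pv_orAcc _ _ _
      · simp only [decide_eq_true (Nat.le_add_left 1 n), Bool.true_and, List.any_cons,
          if_neg (Nat.succ_ne_zero (n + 1)), if_neg (Nat.succ_ne_zero n)]
        exact pv_orAcc _ _ _
      · simp only [List.any_cons]; exact pv_orAcc _ _ _
      · simp only [List.any_cons]; exact pv_orAcc _ _ _

theorem filter_all_eq (cs : List Char) :
    (cs.filter PySem.Chars.isalpha).all PySem.Chars.isupper =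
      !(cs.any (fun c => PySem.Chars.isalpha c && !PySem.Chars.isupper c)) := by
  induction cs with
  | nil => rfl
  | cons c cs ih =>
    by_cases h : PySem.Chars.isalpha c = true <;>
      simp [h, ih]

theorem isIn_space_eq (c : String) :
    PySem.Str.isIn " " c = c.toList.any (· == ' ') := by
  cases h : PySem.Str.isIn " " c with
  | true =>
    have := (PySem.Str.isIn_iff_infix " " c).mp h
    simp only [show (" " : String).toList = [' '] from rfl, List.singleton_infix_iff] at this
    simp [List.any_eq_true, this]
  | false =>
    have h2 := PySem.Str.isIn_iff_infix " " c
    rw [show (" " : String).toList = [' '] from rfl, List.singleton_infix_iff, h] at h2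
    symm
    simp only [List.any_eq_false]
    intro x hx hbe
    rw [beq_iff_eq] at hbe
    subst hbe
    exact absurd (h2.mpr hx) (by simp)

-- the if-chain of A equals the disjunction B computes, given that the tail-scan implies length > 1
theorem chain_eq (a1 d t s n : Bool) (len : Nat) (hlen : t = true → 1 < len) :
    (if a1 then true
     else if d then true
     else if decide (len > 1) && t then true
     else if s then true
     else if n then true
     else false) = (a1 || d || t || s || n) := by
  cases a1 <;> cases d <;> cases t <;> cases s <;> cases n <;> simp_all

theorem tail_any_len (cs : List Char) (p : Char → Bool)
    (h : cs.tail.any p = true) : 1 < cs.length := by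
  cases cs with
  | nil => simp at h
  | cons c t =>
    have : t ≠ [] := by rintro rfl; simp at h
    have := List.length_pos_iff.mpr this
    simp
    omega

-- ===== VERDICT (by name: the statement is the Claim_ definition above) =====
theorem is_safe_for_auto_replace_spec : Claim_equal_is_safe_for_auto_replace := by
  intro canonical _
  unfold Spec_is_safe_for_auto_replace is_safe_for_auto_replace is_safe_for_auto_replace_alt
  by_cases hemp : PySem.Str.strip canonical = ""
  · simp [hemp]
  · rw [if_neg hemp, if_neg hemp, pvLoopB_spec]
    have hslice : PySem.List.slice (PySem.Str.strip canonical).toList (some 1) none =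
        (PySem.Str.strip canonical).toList.drop 1 := by
      simpa using PySem.List.slice_from (PySem.Str.strip canonical).toList (a := 1) (by norm_num)
    simp only [hslice, filter_all_eq, isIn_space_eq, Bool.false_or, Nat.zero_add,
      List.drop_one]
    exact chain_eq _ _ _ _ _ _ (tail_any_len _ _)
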